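-- pv_equiv track=rewrite | github.com/roksprogar/pyvat-with-checksums | pyvat_with_checksums/countries/greece.py | calc_greece
-- ===== SOURCE A (Python) =====
-- def calc_greece(vat: str) -> bool:
--     new_vat = '0' + vat if len(vat) == 8 else vat
--     total = 0
--     multipliers = [256, 128, 64, 32, 16, 8, 4, 2]
--
--     for i in range(8):
--         total += int(new_vat[i]) * multipliers[i]
--
--     total = total % 11
--     if total > 9:
--         total = 0
--
--     expect = int(new_vat[8])
--     return total == expect
-- ===== SOURCE B (Python) =====
-- def calc_greece(vat: str) -> bool:
--     s = '0' + vat if len(vat) == 8 else vat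
--
--     def rem(k):
--         # weighted sum of the first k digits (weights 2^k .. 2), kept reduced mod 11
--         if k == 0:
--             return 0
--         return (2 * (rem(k - 1) + int(s[k - 1]))) % 11
--
--     # the >9 -> 0 clamp on a residue in 0..10 is exactly % 10
--     return rem(8) % 10 == int(s[8])
-- ===== Notes on version B (the rewrite author's own statement) =====
-- stated objective: alternative
-- what changed: Replaced the multipliers table and iterative sum-of-products by a recursive helper that keeps the checksum reduced mod 11 at every step (rem(k) = (2*(rem(k-1)+digit))%11) and replaced the >9->0 clamp by the equivalent %10 on the residue.
import Mathlib
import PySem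

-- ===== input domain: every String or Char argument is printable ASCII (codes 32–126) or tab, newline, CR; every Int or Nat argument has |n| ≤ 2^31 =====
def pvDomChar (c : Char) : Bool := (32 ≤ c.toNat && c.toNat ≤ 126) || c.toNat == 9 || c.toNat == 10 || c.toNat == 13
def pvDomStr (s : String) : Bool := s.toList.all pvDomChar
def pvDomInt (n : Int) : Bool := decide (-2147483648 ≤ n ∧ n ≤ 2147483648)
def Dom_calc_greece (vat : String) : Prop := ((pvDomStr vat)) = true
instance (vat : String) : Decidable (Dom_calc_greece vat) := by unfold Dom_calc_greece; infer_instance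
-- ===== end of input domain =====

-- B drops the multipliers table: a recursive helper keeps the weighted sum reduced mod 11
-- at every step and the >9→0 clamp becomes %10 on the residue; objective: alternative.

-- ===== PORT A =====
def calc_greece (vat : String) : Bool :=
  let nv : List Char := if vat.toList.length = 8 then '0' :: vat.toList else vat.toList
  let multipliers : List Int := [256, 128, 64, 32, 16, 8, 4, 2]
  let total? : Option Int := (PySem.List.pyRange 0 8 1).foldl
    (fun acc i =>
      match acc, PySem.List.pyGet? nv i, PySem.List.pyGet? multipliers i with
      | some t, some c, some m =>
        match PySem.Int.ofStr? (String.ofList [c]) with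
        | some d => some (t + d * m)
        | _ => none
      | _, _, _ => none) (some 0)
  match total?, PySem.List.pyGet? nv 8 with
  | some t, some ec =>
    match PySem.Int.ofStr? (String.ofList [ec]) with
    | some expect =>
      let t1 := PySem.Int.mod t 11
      let t2 : Int := if t1 > 9 then 0 else t1
      t2 == expect
    | _ => false
  | _, _ => false

-- ===== PORT B =====
-- rem(k) of Source B; the Python counter k is only ever the nonnegative 8,7,…,0, so Nat
def calcGreeceRem (s : List Char) : Nat → Option Int
  | 0 => some 0
  | k + 1 =>
    (calcGreeceRem s k).bind fun r =>
      (PySem.List.pyGet? s ((k : Nat) : Int)).bind fun c =>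
        (PySem.Int.ofStr? (String.ofList [c])).map fun d =>
          PySem.Int.mod (2 * (r + d)) 11

def calc_greece_alt (vat : String) : Bool :=
  let s : List Char := if vat.toList.length = 8 then '0' :: vat.toList else vat.toList
  ((calcGreeceRem s 8).bind fun r =>
    (PySem.List.pyGet? s 8).bind fun ec =>
      (PySem.Int.ofStr? (String.ofList [ec])).map fun expect =>
        PySem.Int.mod r 10 == expect).getD false

-- ===== PRECONDITION & SPEC =====
-- Pre_ excludes exactly the inputs on which Python A raises (ValueError on a non-digit
-- among the first nine characters of the padded string, or IndexError when it is shorter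
-- than nine characters); A returns no value there.
def Pre_calc_greece (vat : String) : Prop :=
  let nv : List Char := if vat.toList.length = 8 then '0' :: vat.toList else vat.toList
  9 ≤ nv.length ∧ (nv.take 9).all PySem.Chars.isdigit = true
instance (vat : String) : Decidable (Pre_calc_greece vat) := by unfold Pre_calc_greece; infer_instance
def pvWitness_calc_greece : String := "123456783"

def Spec_calc_greece (vat : String) (out : Bool) : Prop := out = calc_greece_alt vat
instance (vat : String) (out : Bool) : Decidable (Spec_calc_greece vat out) := by unfold Spec_calc_greece; infer_instance

-- ===== CLAIM (what is proved, stated in full; the proofs are below) =====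
def Claim_equal_calc_greece : Prop := ∀ (vat : String), Dom_calc_greece vat → Pre_calc_greece vat → Spec_calc_greece vat (calc_greece vat)

-- ===== LEMMAS AND PROOFS =====

theorem pv_digit_enum (c : Char) (h : PySem.Chars.isdigit c = true) :
    c = '0' ∨ c = '1' ∨ c = '2' ∨ c = '3' ∨ c = '4' ∨ c = '5' ∨ c = '6' ∨ c = '7' ∨ c = '8' ∨ c = '9' := by
  simp only [PySem.Chars.isdigit, Bool.and_eq_true, decide_eq_true_eq] at h
  obtain ⟨h1, h2⟩ := h
  have hv1 : (48 : Nat) ≤ c.toNat := h1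
  have hv2 : c.toNat ≤ 57 := h2
  have h48 : c.toNat = 48 ∨ c.toNat = 49 ∨ c.toNat = 50 ∨ c.toNat = 51 ∨ c.toNat = 52 ∨
      c.toNat = 53 ∨ c.toNat = 54 ∨ c.toNat = 55 ∨ c.toNat = 56 ∨ c.toNat = 57 := by omega
  have hval : ∀ d : Char, c.toNat = d.toNat → c = d := by
    intro d hd
    exact Char.ext (UInt32.toNat_inj.mp hd)
  rcases h48 with h|h|h|h|h|h|h|h|h|h
  · exact Or.inl (hval '0' h)
  · exact Or.inr (Or.inl (hval '1' h))
  · exact Or.inr (Or.inr (Or.inl (hval '2' h)))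
  · exact Or.inr (Or.inr (Or.inr (Or.inl (hval '3' h))))
  · exact Or.inr (Or.inr (Or.inr (Or.inr (Or.inl (hval '4' h)))))
  · exact Or.inr (Or.inr (Or.inr (Or.inr (Or.inr (Or.inl (hval '5' h))))))
  · exact Or.inr (Or.inr (Or.inr (Or.inr (Or.inr (Or.inr (Or.inl (hval '6' h)))))))
  · exact Or.inr (Or.inr (Or.inr (Or.inr (Or.inr (Or.inr (Or.inr (Or.inl (hval '7' h))))))))
  · exact Or.inr (Or.inr (Or.inr (Or.inr (Or.inr (Or.inr (Or.inr (Or.inr (Or.inl (hval '8' h)))))))))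
  · exact Or.inr (Or.inr (Or.inr (Or.inr (Or.inr (Or.inr (Or.inr (Or.inr (Or.inr (hval '9' h)))))))))

theorem pv_ofStr_digit (c : Char) (h : PySem.Chars.isdigit c = true) :
    PySem.Int.ofStr? (String.ofList [c]) = some ((c.toNat : Int) - 48) := by
  rcases pv_digit_enum c h with rfl|rfl|rfl|rfl|rfl|rfl|rfl|rfl|rfl|rfl <;> decide

theorem pv_step (t d : Int) : (2*(t % 11 + d)) % 11 = (2*t + 2*d) % 11 := by omega

theorem pv_chain (d0 d1 d2 d3 d4 d5 d6 d7 : Int) :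
    (2*((2*((2*((2*((2*((2*((2*((2*((0:Int)+d0))%11+d1))%11+d2))%11+d3))%11+d4))%11+d5))%11+d6))%11+d7))%11
    = (0 + d0*256 + d1*128 + d2*64 + d3*32 + d4*16 + d5*8 + d6*4 + d7*2) % 11 := by
  simp only [pv_step]
  ring_nf

set_option maxHeartbeats 2000000 in
theorem calc_greece_agree (vat : String) (h : Pre_calc_greece vat) :
    calc_greece vat = calc_greece_alt vat := by
  unfold calc_greece calc_greece_alt
  unfold Pre_calc_greece at h
  generalize hg : (if vat.toList.length = 8 then '0' :: vat.toList else vat.toList) = nv at h ⊢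
  obtain ⟨hlen, hdig⟩ := h
  have hr : PySem.List.pyRange 0 8 1 = [0, 1, 2, 3, 4, 5, 6, 7] := by decide
  rcases nv with _ | ⟨c0, _ | ⟨c1, _ | ⟨c2, _ | ⟨c3, _ | ⟨c4, _ | ⟨c5, _ | ⟨c6, _ | ⟨c7, _ | ⟨c8, rest⟩⟩⟩⟩⟩⟩⟩⟩⟩ <;>
    simp only [List.length_cons, List.length_nil] at hlen <;> try omega
  simp only [List.take_succ_cons, List.take_zero, List.all_cons, List.all_nil,
    Bool.and_eq_true] at hdig
  obtain ⟨hc0, hc1, hc2, hc3, hc4, hc5, hc6, hc7, hc8, -⟩ := hdig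
  have g0 : PySem.List.pyGet? (c0::c1::c2::c3::c4::c5::c6::c7::c8::rest) (0:Int) = some c0 := by
    rw [show ((0:Int)) = ((0:Nat):Int) by norm_num, PySem.List.pyGet?_natCast]; simp
  have g1 : PySem.List.pyGet? (c0::c1::c2::c3::c4::c5::c6::c7::c8::rest) (1:Int) = some c1 := by
    rw [show ((1:Int)) = ((1:Nat):Int) by norm_num, PySem.List.pyGet?_natCast]; simp
  have g2 : PySem.List.pyGet? (c0::c1::c2::c3::c4::c5::c6::c7::c8::rest) (2:Int) = some c2 := by
    rw [show ((2:Int)) = ((2:Nat):Int) by norm_num, PySem.List.pyGet?_natCast]; simp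
  have g3 : PySem.List.pyGet? (c0::c1::c2::c3::c4::c5::c6::c7::c8::rest) (3:Int) = some c3 := by
    rw [show ((3:Int)) = ((3:Nat):Int) by norm_num, PySem.List.pyGet?_natCast]; simp
  have g4 : PySem.List.pyGet? (c0::c1::c2::c3::c4::c5::c6::c7::c8::rest) (4:Int) = some c4 := by
    rw [show ((4:Int)) = ((4:Nat):Int) by norm_num, PySem.List.pyGet?_natCast]; simp
  have g5 : PySem.List.pyGet? (c0::c1::c2::c3::c4::c5::c6::c7::c8::rest) (5:Int) = some c5 := by
    rw [show ((5:Int)) = ((5:Nat):Int) by norm_num, PySem.List.pyGet?_natCast]; simp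
  have g6 : PySem.List.pyGet? (c0::c1::c2::c3::c4::c5::c6::c7::c8::rest) (6:Int) = some c6 := by
    rw [show ((6:Int)) = ((6:Nat):Int) by norm_num, PySem.List.pyGet?_natCast]; simp
  have g7 : PySem.List.pyGet? (c0::c1::c2::c3::c4::c5::c6::c7::c8::rest) (7:Int) = some c7 := by
    rw [show ((7:Int)) = ((7:Nat):Int) by norm_num, PySem.List.pyGet?_natCast]; simp
  have g8 : PySem.List.pyGet? (c0::c1::c2::c3::c4::c5::c6::c7::c8::rest) (8:Int) = some c8 := by
    rw [show ((8:Int)) = ((8:Nat):Int) by norm_num, PySem.List.pyGet?_natCast]; simp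
  have m0 : PySem.List.pyGet? ([256,128,64,32,16,8,4,2] : List Int) (0:Int) = some 256 := by decide
  have m1 : PySem.List.pyGet? ([256,128,64,32,16,8,4,2] : List Int) (1:Int) = some 128 := by decide
  have m2 : PySem.List.pyGet? ([256,128,64,32,16,8,4,2] : List Int) (2:Int) = some 64 := by decide
  have m3 : PySem.List.pyGet? ([256,128,64,32,16,8,4,2] : List Int) (3:Int) = some 32 := by decide
  have m4 : PySem.List.pyGet? ([256,128,64,32,16,8,4,2] : List Int) (4:Int) = some 16 := by decide
  have m5 : PySem.List.pyGet? ([256,128,64,32,16,8,4,2] : List Int) (5:Int) = some 8 := by decide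
  have m6 : PySem.List.pyGet? ([256,128,64,32,16,8,4,2] : List Int) (6:Int) = some 4 := by decide
  have m7 : PySem.List.pyGet? ([256,128,64,32,16,8,4,2] : List Int) (7:Int) = some 2 := by decide
  simp only [hr, List.foldl, calcGreeceRem, Nat.cast_ofNat, Nat.cast_zero, Nat.cast_one,
    g0, g1, g2, g3, g4, g5, g6, g7, g8, m0, m1, m2, m3, m4, m5, m6, m7,
    pv_ofStr_digit c0 hc0, pv_ofStr_digit c1 hc1, pv_ofStr_digit c2 hc2, pv_ofStr_digit c3 hc3,
    pv_ofStr_digit c4 hc4, pv_ofStr_digit c5 hc5, pv_ofStr_digit c6 hc6, pv_ofStr_digit c7 hc7,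
    pv_ofStr_digit c8 hc8, Option.bind_some, Option.map_some, Option.getD_some]
  have e11 : ∀ a : Int, PySem.Int.mod a 11 = a % 11 :=
    fun a => PySem.Int.mod_eq_emod_of_pos (by norm_num)
  have e10 : ∀ a : Int, PySem.Int.mod a 10 = a % 10 :=
    fun a => PySem.Int.mod_eq_emod_of_pos (by norm_num)
  simp only [e11, e10, pv_chain]
  congr 1
  generalize (0 + ((c0.toNat:Int) - 48)*256 + ((c1.toNat:Int) - 48)*128 + ((c2.toNat:Int) - 48)*64
    + ((c3.toNat:Int) - 48)*32 + ((c4.toNat:Int) - 48)*16 + ((c5.toNat:Int) - 48)*8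
    + ((c6.toNat:Int) - 48)*4 + ((c7.toNat:Int) - 48)*2) = S
  have hb0 : 0 ≤ S % 11 := Int.emod_nonneg S (by norm_num)
  have hb1 : S % 11 < 11 := Int.emod_lt_of_pos S (by norm_num)
  split_ifs with hgt <;> omega

-- ===== VERDICT (by name: the statement is the Claim_ definition above) =====
theorem calc_greece_spec : Claim_equal_calc_greece := by
  intro vat _ hpre
  unfold Spec_calc_greece
  exact calc_greece_agree vat hpre
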